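-- pv_equiv track=rewrite | github.com/LuxSona/tournaments | roundGenerator.py | validMatches
-- ===== SOURCE A (Python) =====
-- def valid(newPairing, allPairings):
--     """Tests if a pairing is valid when taking into account all other pairings.
--
--     If a given tuple is present in a list of all previous pairings (regardless of order), then
--     this function returns false. In context for our tournament code, this is to ensure that no
--     repeated matchups occur. The order of the competitors in a matchup does not matter, so neither should
--     our tuple pairing.
--
--
--     :param newPairing: A potential pairing.
--     :type newPairing: tuple
--     :param allPairings: All previous pairings
--     :type allPairings: list[tuple]
--     """
--     a,b = newPairing
--     if a == b:
--         return False
--     if (a,b) in allPairings: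
--         return False
--     if (b,a) in allPairings:
--         return False
--     return True
--
-- def validMatches(competitor, allCompetitors, allMatches):
--     '''Gets all valid matches for a single competitor.
--
--     Returns a list of possible matchups which are valid (i.e. the same competitor isn't fighting itself, and is also not present in the round)
--
--     :param competitor: The potential competitor.
--     :param allCompetitors: A list of all the possible competitors.
--     :param allMatches: All previous matches.
--     '''
--     validMatches = []
--     for cj in allCompetitors:
--         possibleMatch = (competitor, cj)
--         if valid(possibleMatch,allMatches):
--             validMatches.append(possibleMatch)
--         else:
--             continue
--     return validMatches
-- ===== SOURCE B (Python) =====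
-- def validMatches(competitor, allCompetitors, allMatches):
--     forbidden = set()
--     for a, b in allMatches:
--         if a == competitor:
--             forbidden.add(b)
--         if b == competitor:
--             forbidden.add(a)
--     return [(competitor, cj) for cj in allCompetitors
--             if cj != competitor and cj not in forbidden]
-- ===== Notes on version B (the rewrite author's own statement) =====
-- stated objective: faster
-- what changed: One pass over allMatches builds a set of the competitor's previous opponents, then a single filtered pass over allCompetitors replaces A's per-candidate rescan of allMatches.
import Mathlib
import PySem

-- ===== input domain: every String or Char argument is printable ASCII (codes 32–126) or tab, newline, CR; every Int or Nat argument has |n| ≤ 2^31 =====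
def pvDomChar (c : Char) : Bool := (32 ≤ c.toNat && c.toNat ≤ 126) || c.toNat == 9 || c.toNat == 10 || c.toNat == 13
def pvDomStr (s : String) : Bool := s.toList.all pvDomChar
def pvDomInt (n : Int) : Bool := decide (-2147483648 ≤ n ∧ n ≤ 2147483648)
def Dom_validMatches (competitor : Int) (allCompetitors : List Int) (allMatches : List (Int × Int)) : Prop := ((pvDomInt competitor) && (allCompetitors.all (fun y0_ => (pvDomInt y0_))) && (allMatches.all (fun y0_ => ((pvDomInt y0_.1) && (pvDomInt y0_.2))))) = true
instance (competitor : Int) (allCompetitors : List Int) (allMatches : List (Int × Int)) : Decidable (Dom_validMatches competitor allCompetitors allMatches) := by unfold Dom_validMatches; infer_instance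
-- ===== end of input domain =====

-- B replaces A's per-candidate rescan of allMatches with a one-pass opponent set, then one filtered pass over allCompetitors.


-- ===== PORT A =====
-- A's helper 'valid': early-return chain of whole-tuple membership tests against the full match list
def pvValid (newPairing : Int × Int) (allPairings : List (Int × Int)) : Bool :=
  if newPairing.1 = newPairing.2 then false
  else if allPairings.contains (newPairing.1, newPairing.2) then false
  else if allPairings.contains (newPairing.2, newPairing.1) then false
  else true

def validMatches (competitor : Int) (allCompetitors : List Int) (allMatches : List (Int × Int)) : List (Int × Int) :=
  allCompetitors.foldl
    (fun acc cj => if pvValid (competitor, cj) allMatches then acc ++ [(competitor, cj)] else acc)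
    []

-- ===== PORT B =====
-- B's loop body over allMatches: add each opponent of `competitor` (either slot) to the forbidden set
def pvForbidStep (competitor : Int) (s : PySem.Set Int) (m : Int × Int) : PySem.Set Int :=
  let s1 := if m.1 = competitor then PySem.Set.add s m.2 else s
  if m.2 = competitor then PySem.Set.add s1 m.1 else s1

def validMatches_alt (competitor : Int) (allCompetitors : List Int) (allMatches : List (Int × Int)) : List (Int × Int) :=
  let forbidden : PySem.Set Int := allMatches.foldl (pvForbidStep competitor) PySem.Set.empty
  (allCompetitors.filter
    (fun cj => cj ≠ competitor && !(PySem.Set.contains forbidden cj))).map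
    (fun cj => (competitor, cj))

-- ===== PRECONDITION & SPEC =====
def Spec_validMatches (competitor : Int) (allCompetitors : List Int) (allMatches : List (Int × Int)) (out : List (Int × Int)) : Prop := out = validMatches_alt competitor allCompetitors allMatches
instance (competitor : Int) (allCompetitors : List Int) (allMatches : List (Int × Int)) (out : List (Int × Int)) : Decidable (Spec_validMatches competitor allCompetitors allMatches out) := by unfold Spec_validMatches; infer_instance

-- ===== CLAIM (what is proved, stated in full; the proofs are below) =====
def Claim_equal_validMatches : Prop := ∀ (competitor : Int) (allCompetitors : List Int) (allMatches : List (Int × Int)), Dom_validMatches competitor allCompetitors allMatches → Spec_validMatches competitor allCompetitors allMatches (validMatches competitor allCompetitors allMatches)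

-- ===== LEMMAS AND PROOFS =====

theorem mem_forbidStep (c : Int) (s : PySem.Set Int) (m : Int × Int) (x : Int) :
    x ∈ pvForbidStep c s m ↔ x ∈ s ∨ (m.1 = c ∧ x = m.2) ∨ (m.2 = c ∧ x = m.1) := by
  simp only [pvForbidStep]
  split_ifs with h1 h2 h2 <;> simp [PySem.Set.mem_add] <;> tauto

-- membership in B's opponent set: exactly the values paired with `c` somewhere in `ms`
theorem mem_forbidden (c : Int) (ms : List (Int × Int)) (s : PySem.Set Int) (x : Int) :
    x ∈ ms.foldl (pvForbidStep c) s
    ↔ x ∈ s ∨ ∃ m ∈ ms, (m.1 = c ∧ x = m.2) ∨ (m.2 = c ∧ x = m.1) := by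
  induction ms generalizing s with
  | nil => simp
  | cons m ms ih =>
    simp only [List.foldl_cons, ih, mem_forbidStep, List.mem_cons]
    aesop

-- per-candidate agreement: A's validity test equals B's filter predicate
theorem pvValid_eq (c cj : Int) (ms : List (Int × Int)) :
    pvValid (c, cj) ms
      = (cj ≠ c && !(PySem.Set.contains (ms.foldl (pvForbidStep c) PySem.Set.empty) cj)) := by
  have hmem : cj ∈ ms.foldl (pvForbidStep c) PySem.Set.empty ↔ (c, cj) ∈ ms ∨ (cj, c) ∈ ms := by
    rw [mem_forbidden]
    constructor
    · rintro (h | ⟨⟨a, b⟩, hm, ⟨rfl, rfl⟩ | ⟨rfl, rfl⟩⟩)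
      · simp [PySem.Set.empty] at h
      · exact Or.inl hm
      · exact Or.inr hm
    · rintro (h | h)
      · exact Or.inr ⟨(c, cj), h, Or.inl ⟨rfl, rfl⟩⟩
      · exact Or.inr ⟨(cj, c), h, Or.inr ⟨rfl, rfl⟩⟩
  simp only [PySem.Set.empty] at hmem
  rw [Bool.eq_iff_iff]
  by_cases h0 : c = cj
  · subst h0; simp [pvValid]
  · by_cases h1 : (c, cj) ∈ ms <;> by_cases h2 : (cj, c) ∈ ms <;>
      simp [pvValid, h0, Ne.symm h0, h1, h2] <;> tauto

-- ===== VERDICT (by name: the statement is the Claim_ definition above) =====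
theorem validMatches_spec : Claim_equal_validMatches := by
  intro c cs ms _
  show validMatches c cs ms = validMatches_alt c cs ms
  unfold validMatches validMatches_alt
  rw [PySem.List.foldl_append_if (fun cj => pvValid (c, cj) ms) (fun cj => (c, cj))]
  simp only [List.nil_append]
  congr 1
  apply List.filter_congr
  intro cj _
  exact pvValid_eq c cj ms
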